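-- pv_equiv track=rewrite | github.com/JIMMYDGENIUS/Pdf_folder_Analyzer | pdf_folder_analysis.py | format_page_ranges
-- ===== SOURCE A (Python) =====
-- def format_page_ranges(page_numbers):
--     """Convert a list of page numbers to a condensed range string"""
--     if not page_numbers:
--         return ""
--
--     ranges = []
--     start = page_numbers[0]
--     prev = start
--
--     for num in page_numbers[1:] + [None]:
--         if num != prev + 1:
--             if start == prev:
--                 ranges.append(str(start))
--             else:
--                 ranges.append(f"{start}-{prev}")
--             start = num
--         prev = num
--
--     return ", ".join(ranges)
-- ===== SOURCE B (Python) =====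
-- def format_page_ranges(page_numbers):
--     """Convert a list of page numbers to a condensed range string"""
--     runs = []  # (first, last) pairs of maximal consecutive runs, right-to-left
--     for x in reversed(page_numbers):
--         if runs and runs[-1][0] == x + 1:
--             runs[-1] = (x, runs[-1][1])
--         else:
--             runs.append((x, x))
--     return ", ".join(str(a) if a == b else f"{a}-{b}" for (a, b) in reversed(runs))
-- ===== Notes on version B (the rewrite author's own statement) =====
-- stated objective: alternative
-- what changed: B makes a single backward pass that merges each element into a list of (first,last) run pairs and formats the pairs at the end, instead of A's forward scan with start/prev state and a None sentinel appended to the list.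
import Mathlib
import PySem

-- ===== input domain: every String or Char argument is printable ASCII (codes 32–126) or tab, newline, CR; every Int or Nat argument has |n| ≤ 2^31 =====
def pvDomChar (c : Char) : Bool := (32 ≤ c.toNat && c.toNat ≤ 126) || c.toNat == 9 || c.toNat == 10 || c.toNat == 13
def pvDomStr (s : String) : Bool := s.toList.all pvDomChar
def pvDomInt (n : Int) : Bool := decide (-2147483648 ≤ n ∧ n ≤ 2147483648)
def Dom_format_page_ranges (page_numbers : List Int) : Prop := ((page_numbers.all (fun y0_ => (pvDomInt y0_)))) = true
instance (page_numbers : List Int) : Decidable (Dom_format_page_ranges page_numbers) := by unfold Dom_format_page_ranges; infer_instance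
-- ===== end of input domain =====

-- B replaces A's forward scan with start/prev state and a None sentinel by a single
-- backward pass that merges each element into a list of (first,last) run pairs,
-- formatted at the end (objective: alternative; same cost).

-- ===== PORT A =====
-- str(start) where start : Option Int; in A's loop the formatted values are always some.
def pvStrOpt : Option Int → String
  | some a => PySem.Int.toStr a
  | none => "None"

-- one iteration of A's for-loop; state = (ranges, start, prev)
def pvStepA (st : List String × Option Int × Option Int) (num : Option Int) :
    List String × Option Int × Option Int :=
  let (ranges, start, prev) := st
  if num ≠ prev.map (· + 1) then
    (ranges ++ [if start = prev then pvStrOpt start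
                else pvStrOpt start ++ "-" ++ pvStrOpt prev], num, num)
  else (ranges, start, num)

def format_page_ranges (page_numbers : List Int) : String :=
  match page_numbers with
  | [] => ""
  | p :: rest =>
    let res := ((rest.map some) ++ [none]).foldl pvStepA ([], some p, some p)
    PySem.Str.join ", " res.1

-- ===== PORT B =====
-- one iteration of B's loop over reversed(page_numbers); runs kept right-to-left, runs[-1] updated/appended
def pvStepB (runs : List (Int × Int)) (x : Int) : List (Int × Int) :=
  match runs.getLast? with
  | some (a, b) => if a = x + 1 then runs.dropLast ++ [(x, b)] else runs ++ [(x, x)]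
  | none => [(x, x)]

def pvFmtPair (p : Int × Int) : String :=
  if p.1 = p.2 then PySem.Int.toStr p.1 else PySem.Int.toStr p.1 ++ "-" ++ PySem.Int.toStr p.2

def format_page_ranges_alt (page_numbers : List Int) : String :=
  PySem.Str.join ", " (((page_numbers.reverse.foldl pvStepB []).reverse).map pvFmtPair)

-- ===== PRECONDITION & SPEC =====
def Spec_format_page_ranges (page_numbers : List Int) (out : String) : Prop := out = format_page_ranges_alt page_numbers
instance (page_numbers : List Int) (out : String) : Decidable (Spec_format_page_ranges page_numbers out) := by unfold Spec_format_page_ranges; infer_instance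

-- ===== CLAIM (what is proved, stated in full; the proofs are below) =====
def Claim_equal_format_page_ranges : Prop := ∀ (page_numbers : List Int), Dom_format_page_ranges page_numbers → Spec_format_page_ranges page_numbers (format_page_ranges page_numbers)

-- ===== LEMMAS AND PROOFS =====

-- the piece A emits for a pending run s..p
def pvPiece (s p : Int) : String :=
  if s = p then PySem.Int.toStr s else PySem.Int.toStr s ++ "-" ++ PySem.Int.toStr p

-- the pieces A emits from state (start = s, prev = p) with remaining input xs (then the sentinel)
def pvPieces (s p : Int) : List Int → List String
  | [] => [pvPiece s p]
  | x :: xs => if x = p + 1 then pvPieces s x xs else pvPiece s p :: pvPieces x x xs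

-- B's runs in natural (left-to-right) order, as a right fold
def pvStep' (x : Int) (runs : List (Int × Int)) : List (Int × Int) :=
  match runs with
  | (a, b) :: rest => if a = x + 1 then (x, b) :: rest else (x, x) :: (a, b) :: rest
  | [] => [(x, x)]

-- pending run (s,p) merged into the runs of the rest of the list
def pvMerge (s p : Int) (runs : List (Int × Int)) : List (Int × Int) :=
  match runs with
  | (a, b) :: rest => if a = p + 1 then (s, b) :: rest else (s, p) :: (a, b) :: rest
  | [] => [(s, p)]

theorem pvStepB_reverse (l : List (Int × Int)) (x : Int) :
    pvStepB l.reverse x = (pvStep' x l).reverse := by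
  cases l with
  | nil => simp [pvStepB, pvStep']
  | cons h t =>
    obtain ⟨a, b⟩ := h
    by_cases hab : a = x + 1 <;>
      simp [pvStepB, pvStep', hab, List.getLast?_append]

theorem foldB_eq_foldr (xs : List Int) :
    xs.reverse.foldl pvStepB [] = (xs.foldr pvStep' []).reverse := by
  induction xs with
  | nil => simp
  | cons x xs ih =>
    simp [List.foldl_append, ih, pvStepB_reverse]

theorem pvStep'_eq_merge (x : Int) (r : List (Int × Int)) :
    pvStep' x r = pvMerge x x r := by
  cases r with
  | nil => rfl
  | cons h t => obtain ⟨a, b⟩ := h; by_cases hab : a = x + 1 <;> simp [pvStep', pvMerge, hab]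

theorem pvPieces_eq_merge (xs : List Int) : ∀ s p : Int,
    pvPieces s p xs = (pvMerge s p (xs.foldr pvStep' [])).map pvFmtPair := by
  induction xs with
  | nil => intro s p; simp [pvPieces, pvMerge, pvFmtPair, pvPiece]
  | cons x xs ih =>
    intro s p
    by_cases hx : x = p + 1
    · subst hx
      cases hr : xs.foldr pvStep' [] with
      | nil => simp [pvPieces, ih, hr, pvMerge, pvStep']
      | cons h t =>
        obtain ⟨a, b⟩ := h
        by_cases hab : a = p + 1 + 1 <;>
          simp [pvPieces, ih, hr, pvMerge, pvStep', hab]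
    · cases hr : xs.foldr pvStep' [] with
      | nil =>
        simp [pvPieces, hx, ih, hr, pvMerge, pvStep', pvFmtPair, pvPiece]
      | cons h t =>
        obtain ⟨a, b⟩ := h
        by_cases hab : a = x + 1 <;>
          simp [pvPieces, hx, ih, hr, pvMerge, pvStep', pvFmtPair, pvPiece, hab]

theorem foldA_eq_pieces (xs : List Int) : ∀ (ranges : List String) (s p : Int),
    (((xs.map some) ++ [none]).foldl pvStepA (ranges, some s, some p)).1
      = ranges ++ pvPieces s p xs := by
  induction xs with
  | nil =>
    intro ranges s p
    simp [pvStepA, pvPieces, pvPiece, pvStrOpt]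
  | cons x xs ih =>
    intro ranges s p
    simp only [List.map_cons, List.cons_append, List.foldl_cons]
    by_cases hx : x = p + 1
    · have hstep : pvStepA (ranges, some s, some p) (some x) = (ranges, some s, some x) := by
        simp [pvStepA, hx]
      rw [hstep, ih]
      simp [pvPieces, hx]
    · have hstep : pvStepA (ranges, some s, some p) (some x)
          = (ranges ++ [pvPiece s p], some x, some x) := by
        simp [pvStepA, hx, pvPiece, pvStrOpt]
      rw [hstep, ih]
      simp [pvPieces, hx]

-- ===== VERDICT (by name: the statement is the Claim_ definition above) =====
theorem format_page_ranges_spec : Claim_equal_format_page_ranges := by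
  intro pn _
  unfold Spec_format_page_ranges format_page_ranges format_page_ranges_alt
  cases pn with
  | nil => decide
  | cons p rest =>
    rw [foldB_eq_foldr, List.reverse_reverse]
    change PySem.Str.join ", "
        ((List.foldl pvStepA ([], some p, some p) (rest.map some ++ [none])).1) = _
    rw [foldA_eq_pieces]
    simp only [List.nil_append, List.foldr_cons, pvStep'_eq_merge]
    rw [pvPieces_eq_merge]
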